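-- pv_equiv track=rewrite | github.com/Dharmil290998/Real-Time-News-Analysis-and-Social-Media-Engagement-System | backend/generate_trending.py | group_hashtags_by_substring
-- ===== SOURCE A (Python) =====
-- def group_hashtags_by_substring(tags_with_mentions):
--     grouped = []
--     seen = set()
--
--     tags = list(tags_with_mentions.items())
--
--     for i in range(len(tags)):
--         tag_i, count_i = tags[i]
--         if tag_i in seen:
--             continue
--
--         group = [(tag_i, count_i)]
--         seen.add(tag_i)
--
--         for j in range(i + 1, len(tags)):
--             tag_j, count_j = tags[j]
--             if tag_j in seen:
--                 continue
--
--             # If one is a prefix, suffix, or substring of another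
--             if tag_i in tag_j or tag_j in tag_i:
--                 group.append((tag_j, count_j))
--                 seen.add(tag_j)
--
--         total_mentions = sum(count for _, count in group)
--         representative = min((t for t, _ in group), key=len)
--         grouped.append((representative, total_mentions))
--
--     return grouped
-- ===== SOURCE B (Python) =====
-- def group_hashtags_by_substring(tags_with_mentions):
--     # Single pass: each tag is dispatched to the first open group whose seed
--     # is substring-related to it, updating that group's running representative
--     # (shortest-so-far, first wins ties) and running total; otherwise it opens
--     # a new group seeded by itself.
--     groups = []  # each entry: [seed_tag, representative, total]
--     for tag, count in tags_with_mentions.items():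
--         for g in groups:
--             if g[0] in tag or tag in g[0]:
--                 g[2] += count
--                 if len(tag) < len(g[1]):
--                     g[1] = tag
--                 break
--         else:
--             groups.append([tag, tag, count])
--     return [(rep, total) for _, rep, total in groups]
-- ===== Notes on version B (the rewrite author's own statement) =====
-- stated objective: alternative
-- what changed: Replaced A's nested index loops with a 'seen' set, explicit per-seed group lists and a final min/sum per group by a single left-to-right pass that dispatches each tag to the first open group whose seed is substring-related to it, maintaining only a running (shortest-so-far representative, total) per group; no seen set, no group lists, no second index loop.
import Mathlib
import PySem

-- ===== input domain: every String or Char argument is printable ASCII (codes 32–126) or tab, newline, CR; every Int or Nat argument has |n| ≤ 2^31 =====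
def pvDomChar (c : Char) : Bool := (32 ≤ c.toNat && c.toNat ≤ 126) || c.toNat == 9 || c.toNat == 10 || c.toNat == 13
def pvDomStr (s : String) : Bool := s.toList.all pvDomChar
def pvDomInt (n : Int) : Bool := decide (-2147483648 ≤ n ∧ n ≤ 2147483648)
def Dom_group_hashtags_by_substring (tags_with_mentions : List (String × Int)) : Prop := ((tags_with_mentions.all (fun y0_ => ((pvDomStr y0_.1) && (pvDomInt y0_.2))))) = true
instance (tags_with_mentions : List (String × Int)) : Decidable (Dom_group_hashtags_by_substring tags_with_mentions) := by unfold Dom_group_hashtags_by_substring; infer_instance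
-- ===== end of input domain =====

-- B replaces A's two nested index loops + 'seen' set + per-group final min/sum by a single
-- left-to-right pass over the pairs that dispatches each tag to the first open group whose
-- seed is substring-related to it, maintaining a running (representative, total) per group.

-- ===== PORT A =====
-- 'tag_i in tag_j or tag_j in tag_i' (shared substring test, used by both ports)
def pvRel (tag_i tag_j : String) : Bool :=
  PySem.Str.isIn tag_i tag_j || PySem.Str.isIn tag_j tag_i

-- inner 'for j in range(i+1, len(tags))' loop: walks the pairs after position i
def pvAInner (tag_i : String) : List (String × Int) → List (String × Int) → PySem.Set String →
    List (String × Int) × PySem.Set String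
  | [], group, seen => (group, seen)
  | (tag_j, count_j) :: rest, group, seen =>
    if PySem.Set.contains seen tag_j then pvAInner tag_i rest group seen
    else if pvRel tag_i tag_j then
      pvAInner tag_i rest (group ++ [(tag_j, count_j)]) (PySem.Set.add seen tag_j)
    else pvAInner tag_i rest group seen

-- outer 'for i in range(len(tags))' loop: walks the pairs, 'grouped' is the accumulator
def pvAOuter : List (String × Int) → List (String × Int) → PySem.Set String → List (String × Int)
  | [], grouped, _ => grouped
  | (tag_i, count_i) :: rest, grouped, seen =>
    if PySem.Set.contains seen tag_i then pvAOuter rest grouped seen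
    else
      let r := pvAInner tag_i rest [(tag_i, count_i)] (PySem.Set.add seen tag_i)
      let total_mentions := (r.1.map Prod.snd).sum
      let representative := (PySem.List.min? (r.1.map Prod.fst) (fun t => PySem.Str.len t)).getD ""
      pvAOuter rest (grouped ++ [(representative, total_mentions)]) r.2

def group_hashtags_by_substring (tags_with_mentions : List (String × Int)) : List (String × Int) :=
  pvAOuter tags_with_mentions [] PySem.Set.empty

-- ===== PORT B =====
-- the inner 'for g in groups: … break / else: append' dispatch: find the first open group
-- whose seed relates to the tag and update its running (rep, total); else open a new group
def pvBStep : List (String × String × Int) → (String × Int) → List (String × String × Int)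
  | [], p => [(p.1, p.1, p.2)]
  | g :: gs, p =>
    if pvRel g.1 p.1 then
      (g.1, (if PySem.Str.len p.1 < PySem.Str.len g.2.1 then p.1 else g.2.1), g.2.2 + p.2) :: gs
    else g :: pvBStep gs p

-- the outer 'for tag, count in …' loop is a fold of pvBStep; then the final comprehension
def group_hashtags_by_substring_alt (tags_with_mentions : List (String × Int)) : List (String × Int) :=
  (tags_with_mentions.foldl pvBStep []).map (fun g => (g.2.1, g.2.2))

-- ===== PRECONDITION & SPEC =====
-- Pre_ excludes association lists with duplicate keys: they do not represent a Python
-- dict (A's parameter type), so no behaviour of A is defined on them at all.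
def Pre_group_hashtags_by_substring (tags_with_mentions : List (String × Int)) : Prop :=
  (tags_with_mentions.map Prod.fst).Nodup

instance (tags_with_mentions : List (String × Int)) : Decidable (Pre_group_hashtags_by_substring tags_with_mentions) := by
  unfold Pre_group_hashtags_by_substring; infer_instance

def pvWitness_group_hashtags_by_substring : (List (String × Int)) :=
  [("ai", 3), ("#ai", 2), ("news", 5)]

def Spec_group_hashtags_by_substring (tags_with_mentions : List (String × Int)) (out : List (String × Int)) : Prop := out = group_hashtags_by_substring_alt tags_with_mentions
instance (tags_with_mentions : List (String × Int)) (out : List (String × Int)) : Decidable (Spec_group_hashtags_by_substring tags_with_mentions out) := by unfold Spec_group_hashtags_by_substring; infer_instance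

-- ===== CLAIM (what is proved, stated in full; the proofs are below) =====
def Claim_equal_group_hashtags_by_substring : Prop := ∀ (tags_with_mentions : List (String × Int)), Dom_group_hashtags_by_substring tags_with_mentions → Pre_group_hashtags_by_substring tags_with_mentions → Spec_group_hashtags_by_substring tags_with_mentions (group_hashtags_by_substring tags_with_mentions)

-- ===== LEMMAS AND PROOFS =====

-- proof-only intermediate: the round-based ('take a seed, split off its related tags,
-- recurse on the rest') description of the grouping; A and B are each proved equal to it
def pvBRec : List (String × Int) → List (String × Int)
  | [] => []
  | (seed_tag, seed_count) :: rest =>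
    let related := rest.filter (fun p => pvRel seed_tag p.1)
    let worklist := rest.filter (fun p => !(pvRel seed_tag p.1))
    let group := (seed_tag, seed_count) :: related
    ((PySem.List.min? (group.map Prod.fst) (fun t => PySem.Str.len t)).getD "",
      (group.map Prod.snd).sum) :: pvBRec worklist
termination_by w => w.length
decreasing_by simpa using Nat.le_trans (List.length_filter_le _ _) (Nat.le_of_eq (by simp))

-- one unfolding step of the round recursion
theorem pvBRec_cons (s : String) (c : Int) (rest : List (String × Int)) :
    pvBRec ((s, c) :: rest) =
      ((PySem.List.min? (((s, c) :: rest.filter (fun p => pvRel s p.1)).map Prod.fst)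
          (fun t => PySem.Str.len t)).getD "",
        (((s, c) :: rest.filter (fun p => pvRel s p.1)).map Prod.snd).sum) ::
        pvBRec (rest.filter (fun p => !(pvRel s p.1))) := by
  rw [pvBRec.eq_def]

-- the inner loop appends exactly the not-yet-seen related pairs, in order
theorem pvAInner_fst (tag_i : String) (rest group : List (String × Int)) (seen : PySem.Set String)
    (hnd : (rest.map Prod.fst).Nodup) :
    (pvAInner tag_i rest group seen).1 =
      group ++ rest.filter (fun p => !(decide (p.1 ∈ seen)) && pvRel tag_i p.1) := by
  induction rest generalizing group seen with
  | nil => simp [pvAInner]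
  | cons hd tl ih =>
    obtain ⟨tag_j, count_j⟩ := hd
    simp only [List.map_cons, List.nodup_cons] at hnd
    obtain ⟨hj, htl⟩ := hnd
    simp only [pvAInner]
    by_cases hs : tag_j ∈ seen
    · rw [if_pos ((PySem.Set.contains_iff seen tag_j).mpr hs)]
      simp [ih _ _ htl, hs]
    · rw [if_neg (fun hh => hs ((PySem.Set.contains_iff seen tag_j).mp hh))]
      by_cases hr : pvRel tag_i tag_j
      · rw [if_pos hr, ih _ _ htl, List.filter_congr (l := tl)
          (q := fun p => !(decide (p.1 ∈ seen)) && pvRel tag_i p.1)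
          (by
            intro p hp
            have hne : p.1 ≠ tag_j := fun h => hj (h ▸ List.mem_map_of_mem hp)
            simp [PySem.Set.mem_add, hne])]
        simp [hs, hr, List.append_assoc]
      · rw [if_neg (by simpa using hr)]
        simp [ih _ _ htl, hs, hr]

-- membership in the inner loop's final 'seen' set
theorem pvAInner_mem (tag_i : String) (rest group : List (String × Int))
    (seen : PySem.Set String) (hnd : (rest.map Prod.fst).Nodup) (x : String) :
    x ∈ (pvAInner tag_i rest group seen).2 ↔
      x ∈ seen ∨
        x ∈ (rest.filter (fun p => !(decide (p.1 ∈ seen)) && pvRel tag_i p.1)).map Prod.fst := by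
  induction rest generalizing group seen with
  | nil => simp [pvAInner]
  | cons hd tl ih =>
    obtain ⟨tag_j, count_j⟩ := hd
    simp only [List.map_cons, List.nodup_cons] at hnd
    obtain ⟨hj, htl⟩ := hnd
    simp only [pvAInner]
    by_cases hs : tag_j ∈ seen
    · rw [if_pos ((PySem.Set.contains_iff seen tag_j).mpr hs)]
      simp [ih _ _ htl, hs]
    · rw [if_neg (fun hh => hs ((PySem.Set.contains_iff seen tag_j).mp hh))]
      by_cases hr : pvRel tag_i tag_j
      · rw [if_pos hr, ih _ _ htl, List.filter_congr (l := tl)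
          (q := fun p => !(decide (p.1 ∈ seen)) && pvRel tag_i p.1)
          (by
            intro p hp
            have hne : p.1 ≠ tag_j := fun h => hj (h ▸ List.mem_map_of_mem hp)
            simp [PySem.Set.mem_add, hne])]
        simp [hs, hr]
        tauto
      · rw [if_neg (by simpa using hr)]
        simp [ih _ _ htl, hs, hr]

-- with pairwise-distinct keys, 'p.1 appears among the filtered keys' is just 'q p'
theorem pv_mem_filter_map (tl : List (String × Int)) (q : (String × Int) → Bool)
    (hnd : (tl.map Prod.fst).Nodup) (p : String × Int) (hp : p ∈ tl) :
    (p.1 ∈ (tl.filter q).map Prod.fst) ↔ q p = true := by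
  constructor
  · intro h
    obtain ⟨r, hr, hrp⟩ := List.mem_map.mp h
    have hrtl := (List.mem_filter.mp hr).1
    have : r = p := List.inj_on_of_nodup_map hnd hrtl hp hrp
    exact this ▸ (List.mem_filter.mp hr).2
  · intro h
    exact List.mem_map_of_mem (List.mem_filter.mpr ⟨hp, h⟩)

-- A's outer loop = accumulator ++ the round recursion on the unseen pairs
theorem pvAOuter_eq (pending : List (String × Int)) :
    ∀ (grouped : List (String × Int)) (seen : PySem.Set String),
    (pending.map Prod.fst).Nodup →
    pvAOuter pending grouped seen =
      grouped ++ pvBRec (pending.filter (fun p => !(decide (p.1 ∈ seen)))) := by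
  induction pending with
  | nil => intro grouped seen _; simp [pvAOuter, pvBRec]
  | cons hd tl ih =>
    intro grouped seen hnd
    obtain ⟨tag_i, count_i⟩ := hd
    simp only [List.map_cons, List.nodup_cons] at hnd
    obtain ⟨hi, htl⟩ := hnd
    simp only [pvAOuter]
    by_cases hs : tag_i ∈ seen
    · rw [if_pos ((PySem.Set.contains_iff seen tag_i).mpr hs)]
      simp [ih _ _ htl, hs]
    · rw [if_neg (fun hh => hs ((PySem.Set.contains_iff seen tag_i).mp hh))]
      have hne : ∀ p ∈ tl, p.1 ≠ tag_i := by
        intro p hp h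
        exact hi (h ▸ List.mem_map_of_mem hp)
      have hadd : tl.filter
            (fun p => !(decide (p.1 ∈ PySem.Set.add seen tag_i)) && pvRel tag_i p.1) =
          tl.filter (fun p => !(decide (p.1 ∈ seen)) && pvRel tag_i p.1) :=
        List.filter_congr (by intro p hp; simp [PySem.Set.mem_add, hne p hp])
      have hfst := pvAInner_fst tag_i tl [(tag_i, count_i)] (PySem.Set.add seen tag_i) htl
      rw [hadd] at hfst
      have hsnd : tl.filter
            (fun p => !(decide (p.1 ∈ (pvAInner tag_i tl [(tag_i, count_i)]
              (PySem.Set.add seen tag_i)).2))) =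
          tl.filter (fun p => !(decide (p.1 ∈ seen)) && !(pvRel tag_i p.1)) := by
        apply List.filter_congr
        intro p hp
        have hm := pvAInner_mem tag_i tl [(tag_i, count_i)] (PySem.Set.add seen tag_i) htl p.1
        rw [hadd, pv_mem_filter_map tl _ htl p hp] at hm
        by_cases hsp : p.1 ∈ seen <;> by_cases hrp : pvRel tag_i p.1 <;>
          simp [hm, PySem.Set.mem_add, hne p hp, hsp, hrp]
      rw [ih _ _ htl, hsnd]
      rw [List.filter_cons]
      simp only [hs, decide_false, Bool.not_false, if_true]
      rw [pvBRec_cons]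
      rw [List.filter_filter, List.filter_filter]
      have hc1 : tl.filter (fun a => pvRel tag_i a.1 && !(decide (a.1 ∈ seen))) =
          tl.filter (fun p => !(decide (p.1 ∈ seen)) && pvRel tag_i p.1) :=
        List.filter_congr (by intro p hp; rw [Bool.and_comm])
      have hc2 : tl.filter (fun a => !(pvRel tag_i a.1) && !(decide (a.1 ∈ seen))) =
          tl.filter (fun p => !(decide (p.1 ∈ seen)) && !(pvRel tag_i p.1)) :=
        List.filter_congr (by intro p hp; rw [Bool.and_comm])
      simp [hfst, hc1, hc2, List.append_assoc]

-- ===== B's fold = the round recursion =====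

-- running (representative, total) update over a block of related pairs
def pvUpd (rt : String × Int) (ps : List (String × Int)) : String × Int :=
  ps.foldl (fun rt p =>
    ((if PySem.Str.len p.1 < PySem.Str.len rt.1 then p.1 else rt.1), rt.2 + p.2)) rt

-- B's fold started on a nonempty group list peels off the head group: the head absorbs
-- exactly the pairs related to its seed, the tail fold sees exactly the others
theorem pvBStep_split (l : List (String × Int)) :
    ∀ (g : String × String × Int) (gs : List (String × String × Int)),
    List.foldl pvBStep (g :: gs) l =
      (g.1, pvUpd g.2 (l.filter (fun p => pvRel g.1 p.1))) ::
        List.foldl pvBStep gs (l.filter (fun p => !(pvRel g.1 p.1))) := by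
  induction l with
  | nil => intro g gs; simp [pvUpd]
  | cons p l ih =>
    intro g gs
    rw [List.foldl_cons]
    by_cases hr : pvRel g.1 p.1
    · rw [show pvBStep (g :: gs) p =
          (g.1, (if PySem.Str.len p.1 < PySem.Str.len g.2.1 then p.1 else g.2.1),
            g.2.2 + p.2) :: gs from by simp [pvBStep, hr]]
      rw [ih]
      simp [hr, pvUpd]
    · rw [show pvBStep (g :: gs) p = g :: pvBStep gs p from by simp [pvBStep, hr]]
      rw [ih]
      simp [hr]

theorem pvUpd_fst (ps : List (String × Int)) :
    ∀ (rt : String × Int),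
    (pvUpd rt ps).1 =
      (ps.map Prod.fst).foldl
        (fun m t => if PySem.Str.len t < PySem.Str.len m then t else m) rt.1 := by
  induction ps with
  | nil => intro rt; rfl
  | cons p ps ih =>
    intro rt
    show (pvUpd ((if PySem.Str.len p.1 < PySem.Str.len rt.1 then p.1 else rt.1),
        rt.2 + p.2) ps).1 = _
    rw [ih]
    rfl

theorem pvUpd_snd (ps : List (String × Int)) :
    ∀ (rt : String × Int),
    (pvUpd rt ps).2 = rt.2 + (ps.map Prod.snd).sum := by
  induction ps with
  | nil => intro rt; simp [pvUpd]
  | cons p ps ih =>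
    intro rt
    show (pvUpd ((if PySem.Str.len p.1 < PySem.Str.len rt.1 then p.1 else rt.1),
        rt.2 + p.2) ps).2 = _
    rw [ih]
    simp only [List.map_cons, List.sum_cons]
    ring

-- 'min(…, key=len)' over a nonempty list IS the running strictly-shorter-wins fold
theorem pvMin_step (s t : String) (ts : List String) :
    PySem.List.min? (s :: t :: ts) (fun u => PySem.Str.len u) =
      PySem.List.min? ((if PySem.Str.len t < PySem.Str.len s then t else s) :: ts)
        (fun u => PySem.Str.len u) := by
  simp [PySem.List.min?, apply_ite]

theorem pvMin_cons (ts : List String) :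
    ∀ (s : String),
    (PySem.List.min? (s :: ts) (fun t => PySem.Str.len t)).getD "" =
      ts.foldl (fun m t => if PySem.Str.len t < PySem.Str.len m then t else m) s := by
  induction ts with
  | nil => intro s; simp [PySem.List.min?]
  | cons t ts ih =>
    intro s
    rw [pvMin_step, ih, List.foldl_cons]

-- the whole of B equals the round recursion (induction on the shrinking worklist length)
theorem pvBfold_eq_pvBRec (n : Nat) :
    ∀ (l : List (String × Int)), l.length ≤ n →
    pvBRec l = (List.foldl pvBStep [] l).map (fun g => (g.2.1, g.2.2)) := by
  induction n with
  | zero =>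
    intro l h
    have : l = [] := List.eq_nil_of_length_eq_zero (Nat.le_zero.mp h)
    subst this
    simp [pvBRec]
  | succ n ih =>
    intro l h
    match l with
    | [] => simp [pvBRec]
    | (s, c) :: rest =>
      rw [pvBRec_cons, List.foldl_cons]
      have hstep : pvBStep [] (s, c) = [(s, s, c)] := rfl
      rw [hstep, pvBStep_split]
      simp only [List.map]
      have hlen : (rest.filter (fun p => !(pvRel s p.1))).length ≤ n :=
        Nat.le_trans (List.length_filter_le _ _) (Nat.lt_succ_iff.mp (by simpa using h))
      rw [← ih _ hlen]
      congr 1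
      have hfst := pvUpd_fst (rest.filter (fun p => pvRel s p.1)) (s, c)
      have hsnd := pvUpd_snd (rest.filter (fun p => pvRel s p.1)) (s, c)
      rw [pvMin_cons _ s]
      simp only [List.sum_cons]
      exact Prod.ext hfst.symm (by rw [hsnd])

-- ===== VERDICT (by name: the statement is the Claim_ definition above) =====
theorem group_hashtags_by_substring_spec : Claim_equal_group_hashtags_by_substring := by
  intro tags _hdom hpre
  unfold Spec_group_hashtags_by_substring group_hashtags_by_substring
    group_hashtags_by_substring_alt
  rw [pvAOuter_eq tags [] PySem.Set.empty hpre]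
  simp only [List.nil_append]
  rw [show tags.filter (fun p => !(decide (p.1 ∈ PySem.Set.empty))) = tags by
    simp [PySem.Set.empty]]
  exact pvBfold_eq_pvBRec tags.length tags le_rfl
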